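-- pv_equiv track=rewrite | github.com/AshBrandywine/PotAnalyzer | passwordtools.py | get_mask
-- ===== SOURCE A (Python) =====
-- alpha_lower_mask = "?l"
--
-- alpha_lower_pool = "abcdefghijklmnopqrstuvwxyz"
--
-- alpha_upper_mask = "?u"
--
-- alpha_upper_pool = "ABCDEFGHIJKLMNOPQRSTUVWXYZ"
--
-- numeric_mask = "?d"
--
-- digit_pool = "0123456789"
--
-- special_mask = "?s"
--
-- def get_mask(password):
--     mask = []
--     for char in password:
--         if char in alpha_lower_pool:
--             mask.append(alpha_lower_mask)
--         elif char in alpha_upper_pool: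
--             mask.append(alpha_upper_mask)
--         elif char in digit_pool:
--             mask.append(numeric_mask)
--         else:
--             mask.append(special_mask)
--     return mask
-- ===== SOURCE B (Python) =====
-- alpha_lower_mask = "?l"
-- alpha_lower_pool = "abcdefghijklmnopqrstuvwxyz"
-- alpha_upper_mask = "?u"
-- alpha_upper_pool = "ABCDEFGHIJKLMNOPQRSTUVWXYZ"
-- numeric_mask = "?d"
-- digit_pool = "0123456789"
-- special_mask = "?s"
--
-- # Staged overwrite: pre-fill the whole mask with special_mask, then run one
-- # sweep per character class, overwriting positions whose code point falls in
-- # that class's contiguous ASCII range (the pools are exactly these ranges,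
-- # and the ranges are disjoint, so at most one sweep touches each position).
-- def get_mask(password):
--     mask = [special_mask] * len(password)
--     for lo, hi, m in ((97, 122, alpha_lower_mask),
--                       (65, 90, alpha_upper_mask),
--                       (48, 57, numeric_mask)):
--         for i, char in enumerate(password):
--             if lo <= ord(char) <= hi:
--                 mask[i] = m
--     return mask
-- ===== Notes on version B (the rewrite author's own statement) =====
-- stated objective: alternative
-- what changed: Replaces A's single pass with a 4-way elif membership ladder over pool strings by a pre-filled special-mask list refined by three separate overwrite sweeps, one per character class, each testing a contiguous ASCII code-point range arithmetically instead of string membership.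
import Mathlib
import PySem

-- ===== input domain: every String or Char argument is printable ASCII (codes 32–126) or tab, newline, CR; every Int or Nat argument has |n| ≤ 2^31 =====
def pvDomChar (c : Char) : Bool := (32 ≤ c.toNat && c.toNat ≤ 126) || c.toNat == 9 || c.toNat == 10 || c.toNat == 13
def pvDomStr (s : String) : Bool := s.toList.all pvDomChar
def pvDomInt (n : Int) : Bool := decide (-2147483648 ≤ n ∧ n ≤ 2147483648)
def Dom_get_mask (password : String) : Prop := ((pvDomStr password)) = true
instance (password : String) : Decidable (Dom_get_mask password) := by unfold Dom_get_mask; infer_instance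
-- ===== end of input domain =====

-- B replaces A's single pass with a 4-way elif membership ladder by a pre-filled
-- special-mask list refined by three per-class overwrite sweeps testing contiguous
-- ASCII code-point ranges (objective: alternative).

-- ===== PORT A =====
def alpha_lower_mask : String := "?l"
def alpha_lower_pool : String := "abcdefghijklmnopqrstuvwxyz"
def alpha_upper_mask : String := "?u"
def alpha_upper_pool : String := "ABCDEFGHIJKLMNOPQRSTUVWXYZ"
def numeric_mask : String := "?d"
def digit_pool : String := "0123456789"
def special_mask : String := "?s"

-- 'char in pool' on a one-character char: PySem.Str.isIn is exact Python substring membership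
def get_mask (password : String) : List String :=
  password.toList.foldl
    (fun mask char =>
      if PySem.Str.isIn (String.ofList [char]) alpha_lower_pool then mask ++ [alpha_lower_mask]
      else if PySem.Str.isIn (String.ofList [char]) alpha_upper_pool then mask ++ [alpha_upper_mask]
      else if PySem.Str.isIn (String.ofList [char]) digit_pool then mask ++ [numeric_mask]
      else mask ++ [special_mask])
    []

-- ===== PORT B =====
-- mask = [special_mask] * len(password); then three overwrite sweeps, one per
-- (lo, hi, m) class triple; ord(char) is Char.toNat, mask[i] = m is pySetD.
def get_mask_alt (password : String) : List String :=
  ([(97, 122, alpha_lower_mask), (65, 90, alpha_upper_mask), (48, 57, numeric_mask)] :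
      List (Nat × Nat × String)).foldl
    (fun mask t =>
      (PySem.List.enumerate password.toList 0).foldl
        (fun mask p =>
          if t.1 ≤ p.2.toNat ∧ p.2.toNat ≤ t.2.1 then PySem.List.pySetD mask p.1 t.2.2 else mask)
        mask)
    (List.replicate password.toList.length special_mask)

-- ===== PRECONDITION & SPEC =====
def Spec_get_mask (password : String) (out : List String) : Prop := out = get_mask_alt password
instance (password : String) (out : List String) : Decidable (Spec_get_mask password out) := by unfold Spec_get_mask; infer_instance

-- ===== CLAIM (what is proved, stated in full; the proofs are below) =====
def Claim_equal_get_mask : Prop := ∀ (password : String), Dom_get_mask password → Spec_get_mask password (get_mask password)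

-- ===== LEMMAS AND PROOFS =====

set_option maxRecDepth 4000

-- A's loop body, as a pure classification function
def pvClassify (char : Char) : String :=
  if PySem.Str.isIn (String.ofList [char]) alpha_lower_pool then alpha_lower_mask
  else if PySem.Str.isIn (String.ofList [char]) alpha_upper_pool then alpha_upper_mask
  else if PySem.Str.isIn (String.ofList [char]) digit_pool then numeric_mask
  else special_mask

theorem get_mask_eq_map (password : String) :
    get_mask password = password.toList.map pvClassify := by
  unfold get_mask
  have hfun : (fun (mask : List String) (char : Char) =>
      if PySem.Str.isIn (String.ofList [char]) alpha_lower_pool then mask ++ [alpha_lower_mask]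
      else if PySem.Str.isIn (String.ofList [char]) alpha_upper_pool then mask ++ [alpha_upper_mask]
      else if PySem.Str.isIn (String.ofList [char]) digit_pool then mask ++ [numeric_mask]
      else mask ++ [special_mask])
      = (fun (mask : List String) (char : Char) => mask ++ [pvClassify char]) := by
    funext mask char
    unfold pvClassify
    split_ifs <;> rfl
  rw [hfun, PySem.List.foldl_append_singleton_eq_map]
  simp

-- one-character 'in pool' is list membership
theorem isIn_singleton (c : Char) (s : String) :
    PySem.Str.isIn (String.ofList [c]) s = decide (c ∈ s.toList) := by
  have hred : PySem.Str.isIn (String.ofList [c]) s = PySem.Chars.isIn [c] s.toList := by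
    simp
  rw [hred]
  by_cases h : c ∈ s.toList
  · simp only [h, decide_true]
    rw [PySem.Chars.isIn_iff_infix, List.singleton_infix_iff]
    exact h
  · simp only [h, decide_false]
    rw [PySem.Chars.isIn_eq_false_iff, List.singleton_infix_iff]
    exact h

-- each pool is exactly a contiguous ASCII code-point range
theorem mem_lower_iff (c : Char) :
    c ∈ alpha_lower_pool.toList ↔ (97 ≤ c.toNat ∧ c.toNat ≤ 122) := by
  have hl : alpha_lower_pool.toList = ['a','b','c','d','e','f','g','h','i','j','k','l','m','n','o','p','q','r','s','t','u','v','w','x','y','z'] := by rfl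
  rw [hl]
  constructor
  · intro h
    simp only [List.mem_cons, List.not_mem_nil, or_false] at h
    rcases h with h|h|h|h|h|h|h|h|h|h|h|h|h|h|h|h|h|h|h|h|h|h|h|h|h|h <;> subst h <;> decide
  · intro ⟨h1, h2⟩
    have hc : c = Char.ofNat c.toNat := (Char.ofNat_toNat c).symm
    rw [hc]
    interval_cases h : c.toNat <;> decide

theorem mem_upper_iff (c : Char) :
    c ∈ alpha_upper_pool.toList ↔ (65 ≤ c.toNat ∧ c.toNat ≤ 90) := by
  have hl : alpha_upper_pool.toList = ['A','B','C','D','E','F','G','H','I','J','K','L','M','N','O','P','Q','R','S','T','U','V','W','X','Y','Z'] := by rfl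
  rw [hl]
  constructor
  · intro h
    simp only [List.mem_cons, List.not_mem_nil, or_false] at h
    rcases h with h|h|h|h|h|h|h|h|h|h|h|h|h|h|h|h|h|h|h|h|h|h|h|h|h|h <;> subst h <;> decide
  · intro ⟨h1, h2⟩
    have hc : c = Char.ofNat c.toNat := (Char.ofNat_toNat c).symm
    rw [hc]
    interval_cases h : c.toNat <;> decide

theorem mem_digit_iff (c : Char) :
    c ∈ digit_pool.toList ↔ (48 ≤ c.toNat ∧ c.toNat ≤ 57) := by
  have hl : digit_pool.toList = ['0','1','2','3','4','5','6','7','8','9'] := by rfl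
  rw [hl]
  constructor
  · intro h
    simp only [List.mem_cons, List.not_mem_nil, or_false] at h
    rcases h with h|h|h|h|h|h|h|h|h|h <;> subst h <;> decide
  · intro ⟨h1, h2⟩
    have hc : c = Char.ofNat c.toNat := (Char.ofNat_toNat c).symm
    rw [hc]
    interval_cases h : c.toNat <;> decide

-- one overwrite sweep rewrites the mask pointwise (offset form for the induction)
theorem pass_eq (P : Char → Prop) [DecidablePred P] (m : String) :
    ∀ (l : List Char) (pre mask : List String), mask.length = l.length →
      (PySem.List.enumerate l (pre.length : Int)).foldl
        (fun mk p => if P p.2 then PySem.List.pySetD mk p.1 m else mk) (pre ++ mask)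
      = pre ++ List.zipWith (fun c old => if P c then m else old) l mask := by
  intro l
  induction l with
  | nil =>
    intro pre mask h
    rw [List.length_nil] at h
    rw [List.eq_nil_of_length_eq_zero h]
    simp [PySem.List.enumerate_nil]
  | cons c t ih =>
    intro pre mask h
    cases mask with
    | nil => simp at h
    | cons old rest =>
      rw [PySem.List.enumerate_cons]
      simp only [List.foldl_cons, List.zipWith_cons_cons]
      have hset : (if P c then PySem.List.pySetD (pre ++ old :: rest) (pre.length : Int) m
          else pre ++ old :: rest) = pre ++ (if P c then m else old) :: rest := by
        split_ifs with hp
        · rw [PySem.List.pySetD_natCast]; simp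
        · rfl
      rw [hset]
      have hlen : rest.length = t.length := by simpa using h
      have hpre : ((pre.length : Int) + 1) = (((pre ++ [if P c then m else old]).length : Nat) : Int) := by
        simp
      have hassoc : pre ++ (if P c then m else old) :: rest
          = (pre ++ [if P c then m else old]) ++ rest := by simp
      rw [hpre, hassoc, ih (pre ++ [if P c then m else old]) rest hlen]
      simp

-- the sweep as it appears in the port (start index 0, no prefix)
theorem pass_eq_zero (P : Char → Prop) [DecidablePred P] (m : String)
    (l : List Char) (mask : List String) (h : mask.length = l.length) :
    (PySem.List.enumerate l 0).foldl
      (fun mk p => if P p.2 then PySem.List.pySetD mk p.1 m else mk) mask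
    = List.zipWith (fun c old => if P c then m else old) l mask := by
  have := pass_eq P m l [] mask h
  simpa using this

-- zipWith over l against l.map g fuses into one map
theorem zipWith_map_self (f : Char → String → String) (g : Char → String) :
    ∀ (l : List Char), List.zipWith f l (l.map g) = l.map (fun c => f c (g c)) := by
  intro l
  induction l with
  | nil => rfl
  | cons c t ih => simp [ih]

-- the three fused sweeps agree with A's elif ladder on every character
theorem pointwise (c : Char) :
    (if 48 ≤ c.toNat ∧ c.toNat ≤ 57 then numeric_mask
     else if 65 ≤ c.toNat ∧ c.toNat ≤ 90 then alpha_upper_mask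
     else if 97 ≤ c.toNat ∧ c.toNat ≤ 122 then alpha_lower_mask
     else special_mask) = pvClassify c := by
  unfold pvClassify
  simp only [isIn_singleton, decide_eq_true_eq, mem_lower_iff, mem_upper_iff, mem_digit_iff]
  split_ifs <;> first | rfl | omega

-- ===== VERDICT (by name: the statement is the Claim_ definition above) =====
theorem get_mask_spec : Claim_equal_get_mask := by
  intro password _
  unfold Spec_get_mask get_mask_alt
  simp only [List.foldl_cons, List.foldl_nil]
  rw [pass_eq_zero (fun c => 97 ≤ c.toNat ∧ c.toNat ≤ 122) alpha_lower_mask _ _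
        (by simp)]
  rw [show List.replicate password.toList.length special_mask
        = password.toList.map (fun _ => special_mask) by simp [List.map_const'],
      zipWith_map_self]
  rw [pass_eq_zero (fun c => 65 ≤ c.toNat ∧ c.toNat ≤ 90) alpha_upper_mask _ _
        (by simp), zipWith_map_self]
  rw [pass_eq_zero (fun c => 48 ≤ c.toNat ∧ c.toNat ≤ 57) numeric_mask _ _
        (by simp), zipWith_map_self]
  rw [get_mask_eq_map]
  exact (List.map_congr_left (fun c _ => pointwise c)).symm
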